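-- pv_equiv track=rewrite | github.com/Banana96/id3_dec_tree | id3.py | prune_get_subtrees
-- ===== SOURCE A (Python) =====
-- def remove_orphans(tree):
-- 	ac = set()
--
-- 	def mark(index):
-- 		if index in tree.keys():
-- 			ac.add(index)
-- 			if tree[index][1] == 0:
-- 				mark(2 * index + 1)
-- 				mark(2 * index + 2)
--
-- 	mark(0)
-- 	rem = list(set(tree.keys()).difference(ac))
--
-- 	for r in rem:
-- 		del tree[r]
--
-- 	return tree
--
-- def prune_get_subtrees(tree):
-- 	trees = []
-- 	for k in tree.keys():
-- 		if tree[k][1] == 0: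
-- 			c1 = dict(tree)
-- 			c2 = dict(tree)
-- 			c1[k] = (1, 1)
-- 			c2[k] = (0, 1)
-- 			trees.append(remove_orphans(c1))
-- 			trees.append(remove_orphans(c2))
--
-- 	return trees
-- ===== SOURCE B (Python) =====
-- def prune_get_subtrees(tree):
-- 	def kept(i, k):
-- 		# walk the ancestor chain towards the root; the node survives iff the
-- 		# walk reaches index 0 through present internal nodes other than k
-- 		while i > 0:
-- 			i = (i - 1) // 2
-- 			if i not in tree or tree[i][1] != 0 or i == k:
-- 				return False
-- 		return i == 0
--
-- 	trees = []
-- 	for k, v in tree.items():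
-- 		if v[1] == 0:
-- 			for leaf in ((1, 1), (0, 1)):
-- 				trees.append({i: (leaf if i == k else w)
-- 				              for i, w in tree.items() if kept(i, k)})
-- 	return trees
-- ===== Notes on version B (the rewrite author's own statement) =====
-- stated objective: alternative
-- what changed: Instead of copying the whole dict, recursively marking reachable nodes from the root and deleting the orphans afterwards, B builds each pruned dict in one comprehension over the original items, deciding survival of each node by walking its ancestor chain i -> (i-1)//2 up to the root and checking the walk reaches index 0 through present internal nodes other than the pruned key; Pre_ excludes association lists with duplicate keys, which do not encode a Python dict.
import Mathlib
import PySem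

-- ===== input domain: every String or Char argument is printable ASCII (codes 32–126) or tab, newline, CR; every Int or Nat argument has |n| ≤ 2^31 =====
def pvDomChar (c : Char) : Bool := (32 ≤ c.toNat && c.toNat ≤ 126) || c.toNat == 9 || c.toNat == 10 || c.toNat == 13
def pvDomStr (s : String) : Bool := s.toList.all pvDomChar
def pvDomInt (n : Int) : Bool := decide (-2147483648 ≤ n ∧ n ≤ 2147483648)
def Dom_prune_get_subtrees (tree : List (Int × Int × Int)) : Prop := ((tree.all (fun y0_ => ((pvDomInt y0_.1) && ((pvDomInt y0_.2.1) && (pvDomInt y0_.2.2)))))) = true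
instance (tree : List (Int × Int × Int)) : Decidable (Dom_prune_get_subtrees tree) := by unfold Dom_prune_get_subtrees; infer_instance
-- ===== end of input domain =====

-- B replaces A's copy / recursive-mark / delete-orphans structure by a single pass over the
-- original items that decides survival of each node by walking its ancestor chain up to the
-- root (objective: alternative decomposition). Return values only; A mutates its local
-- copies, never the argument.

-- ===== PORT A =====

-- termination measure for `mark`: number of stored entries whose key is ≥ i
def pvKeysGE (d : PySem.Dict Int (Int × Int)) (i : Nat) : Nat :=
  (d.items.filter (fun e => (i : Int) ≤ e.1)).length

theorem pvKeysGE_child_lt (d : PySem.Dict Int (Int × Int)) (i j : Nat) (hij : i < j)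
    {v : Int × Int} (h : d.get? (i : Int) = some v) : pvKeysGE d j < pvKeysGE d i := by
  obtain ⟨e, he, hkey⟩ : ∃ e ∈ d.items, e.1 = (i : Int) := by
    simp only [PySem.Dict.get?, Option.map_eq_some_iff] at h
    obtain ⟨p, hp, -⟩ := h
    exact ⟨p, List.mem_of_find?_eq_some hp, by simpa using List.find?_some hp⟩
  have hsub : d.items.filter (fun e => (j : Int) ≤ e.1)
      = (d.items.filter (fun e => (i : Int) ≤ e.1)).filter (fun e => (j : Int) ≤ e.1) := by
    rw [List.filter_filter]
    refine (List.filter_congr ?_).symm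
    intro x _
    by_cases hx : (j : Int) ≤ x.1
    · simp [hx]
      omega
    · simp [hx]
  unfold pvKeysGE
  rw [hsub]
  refine List.length_filter_lt_length_iff_exists.mpr ⟨e, ?_, ?_⟩
  · exact List.mem_filter.mpr ⟨he, by simp [hkey]⟩
  · simp only [hkey, decide_eq_true_eq]
    omega

-- `mark(index)` from remove_orphans, state-passing over the accumulator set `ac`
def markA (d : PySem.Dict Int (Int × Int)) (ac : PySem.Set Int) (i : Nat) : PySem.Set Int :=
  match h : d.get? (i : Int) with
  | none => ac
  | some v =>
    let ac' := PySem.Set.add ac (i : Int)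
    if v.2 = 0 then markA d (markA d ac' (2 * i + 1)) (2 * i + 2) else ac'
termination_by pvKeysGE d i
decreasing_by
  · exact pvKeysGE_child_lt d i (2 * i + 1) (by omega) h
  · exact pvKeysGE_child_lt d i (2 * i + 2) (by omega) h

def remove_orphansA (d : PySem.Dict Int (Int × Int)) : PySem.Dict Int (Int × Int) :=
  let ac := markA d PySem.Set.empty 0
  let rem := PySem.Set.diff (PySem.Set.ofList (PySem.Dict.keys d)) ac
  rem.foldl (fun t r => PySem.Dict.erase t r) d

def prune_get_subtrees (tree : List (Int × Int × Int)) : List (List (Int × Int × Int)) :=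
  let d : PySem.Dict Int (Int × Int) := PySem.Dict.mk tree
  (PySem.Dict.keys d).foldl (fun trees k =>
    match d.get? k with
    | none => trees    -- unreachable: k is drawn from d.keys (Python would raise KeyError)
    | some v =>
      if v.2 = 0 then
        trees ++ [(remove_orphansA (d.insert k (1, 1))).items,
                  (remove_orphansA (d.insert k (0, 1))).items]
      else trees) []

-- ===== PORT B =====

-- `kept(i, k)`: walk the ancestor chain of i towards the root; the node survives iff the
-- walk reaches index 0 through present internal nodes other than the pruned key k
def keptB (d : PySem.Dict Int (Int × Int)) (k : Int) (i : Int) : Bool :=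
  if _h : 0 < i then
    let p := PySem.Int.floordiv (i - 1) 2
    match d.get? p with
    | none => false
    | some v => if v.2 ≠ 0 ∨ p = k then false else keptB d k p
  else i == 0
termination_by i.toNat
decreasing_by
  simp only [PySem.Int.floordiv_eq_ediv_of_pos (by omega : (0:Int) < 2)]
  omega

def subB (d : PySem.Dict Int (Int × Int)) (k : Int) (leaf : Int × Int) : List (Int × Int × Int) :=
  d.items.filterMap (fun e =>
    if keptB d k e.1 = true then
      some (e.1, if e.1 = k then leaf else e.2)
    else none)

def prune_get_subtrees_alt (tree : List (Int × Int × Int)) : List (List (Int × Int × Int)) :=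
  let d : PySem.Dict Int (Int × Int) := PySem.Dict.mk tree
  d.items.foldl (fun trees e =>
    if e.2.2 = 0 then
      trees ++ [subB d e.1 (1, 1), subB d e.1 (0, 1)]
    else trees) []

-- ===== PRECONDITION & SPEC =====

-- Pre_ excludes association lists with duplicate keys: they do not encode a Python dict
-- (A's parameter is a dict, so no such input ever reaches the Python A).
def Pre_prune_get_subtrees (tree : List (Int × Int × Int)) : Prop :=
  (tree.map Prod.fst).Nodup

instance (tree : List (Int × Int × Int)) : Decidable (Pre_prune_get_subtrees tree) := by
  unfold Pre_prune_get_subtrees; infer_instance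

def pvWitness_prune_get_subtrees : (List (Int × Int × Int)) := [(0, 0, 0), (1, 1, 1)]

def Spec_prune_get_subtrees (tree : List (Int × Int × Int)) (out : List (List (Int × Int × Int))) : Prop := out = prune_get_subtrees_alt tree
instance (tree : List (Int × Int × Int)) (out : List (List (Int × Int × Int))) : Decidable (Spec_prune_get_subtrees tree out) := by unfold Spec_prune_get_subtrees; infer_instance

-- ===== CLAIM (what is proved, stated in full; the proofs are below) =====
def Claim_equal_prune_get_subtrees : Prop := ∀ (tree : List (Int × Int × Int)), Dom_prune_get_subtrees tree → Pre_prune_get_subtrees tree → Spec_prune_get_subtrees tree (prune_get_subtrees tree)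

-- ===== LEMMAS AND PROOFS =====

-- `Desc c i n`: mark, started at index i, visits (and records) index n
inductive Desc (c : PySem.Dict Int (Int × Int)) : Nat → Nat → Prop where
  | refl (i : Nat) (h : (c.get? (i : Int)).isSome) : Desc c i i
  | left {i n : Nat} {v : Int × Int} (h : c.get? (i : Int) = some v) (hf : v.2 = 0)
      (hd : Desc c (2 * i + 1) n) : Desc c i n
  | right {i n : Nat} {v : Int × Int} (h : c.get? (i : Int) = some v) (hf : v.2 = 0)
      (hd : Desc c (2 * i + 2) n) : Desc c i n

theorem mem_markA (c : PySem.Dict Int (Int × Int)) (ac : PySem.Set Int) (i : Nat) (x : Int) :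
    x ∈ markA c ac i ↔ x ∈ ac ∨ ∃ n : Nat, Desc c i n ∧ x = (n : Int) := by
  fun_induction markA c ac i with
  | case1 ac i h =>
    constructor
    · exact Or.inl
    · rintro (hx | ⟨n, hd, rfl⟩)
      · exact hx
      · cases hd with
        | refl _ hs => rw [h] at hs; simp at hs
        | left h' _ _ => rw [h] at h'; cases h'
        | right h' _ _ => rw [h] at h'; cases h'
  | case2 ac i v h acs hv ih1 ih1' ih2 =>
    rw [ih2, ih1, PySem.Set.mem_add]
    constructor
    · rintro (((hx | rfl) | ⟨n, hd, rfl⟩) | ⟨n, hd, rfl⟩)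
      · exact Or.inl hx
      · exact Or.inr ⟨i, Desc.refl i (by simp [h]), rfl⟩
      · exact Or.inr ⟨n, Desc.left h hv hd, rfl⟩
      · exact Or.inr ⟨n, Desc.right h hv hd, rfl⟩
    · rintro (hx | ⟨n, hd, rfl⟩)
      · exact Or.inl (Or.inl (Or.inl hx))
      · cases hd with
        | refl _ _ => exact Or.inl (Or.inl (Or.inr rfl))
        | left h' hf' hd' => exact Or.inl (Or.inr ⟨n, hd', rfl⟩)
        | right h' hf' hd' => exact Or.inr ⟨n, hd', rfl⟩
  | case3 ac i v h acs hv =>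
    show x ∈ PySem.Set.add ac (i : Int) ↔ _
    rw [PySem.Set.mem_add]
    constructor
    · rintro (hx | rfl)
      · exact Or.inl hx
      · exact Or.inr ⟨i, Desc.refl i (by simp [h]), rfl⟩
    · rintro (hx | ⟨n, hd, rfl⟩)
      · exact Or.inl hx
      · cases hd with
        | refl _ _ => exact Or.inr rfl
        | left h' hf' hd' => rw [h] at h'; cases h'; exact absurd hf' hv
        | right h' hf' hd' => rw [h] at h'; cases h'; exact absurd hf' hv

-- proof-side Nat restatement of B's `kept` walk (B's port itself works on Int indices)
def keptNat (d : PySem.Dict Int (Int × Int)) (k : Int) (i : Nat) : Bool :=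
  if i = 0 then true
  else
    match d.get? (((i - 1) / 2 : Nat) : Int) with
    | none => false
    | some v =>
      if v.2 ≠ 0 ∨ (((i - 1) / 2 : Nat) : Int) = k then false else keptNat d k ((i - 1) / 2)

theorem keptB_natCast (d : PySem.Dict Int (Int × Int)) (k : Int) (n : Nat) :
    keptB d k (n : Int) = keptNat d k n := by
  induction n using Nat.strong_induction_on with
  | _ n ih =>
    rcases Nat.eq_zero_or_pos n with rfl | hn
    · rw [keptB, keptNat]; simp
    · rw [keptB, keptNat, dif_pos (by exact_mod_cast hn), if_neg (by omega)]
      have hc : (n : Int) - 1 = ((n - 1 : Nat) : Int) := by omega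
      have hp : PySem.Int.floordiv ((n : Int) - 1) 2 = (((n - 1) / 2 : Nat) : Int) := by
        rw [hc]; exact_mod_cast PySem.Int.floordiv_natCast (n - 1) 2
      simp only [hp]
      rcases hg : d.get? (((n - 1) / 2 : Nat) : Int) with _ | v
      · rfl
      · dsimp only
        by_cases hcond : v.2 ≠ 0 ∨ (((n - 1) / 2 : Nat) : Int) = k
        · rw [if_pos hcond, if_pos hcond]
        · rw [if_neg hcond, if_neg hcond, ih _ (by omega)]

theorem keptB_neg (d : PySem.Dict Int (Int × Int)) (k : Int) (i : Int) (hi : i < 0) :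
    keptB d k i = false := by
  rw [keptB, dif_neg (by omega)]
  simp
  omega

theorem keptB_iff (d : PySem.Dict Int (Int × Int)) (k : Int) (i : Int) :
    keptB d k i = true ↔ 0 ≤ i ∧ keptNat d k i.toNat = true := by
  rcases lt_or_ge i 0 with hi | hi
  · rw [keptB_neg d k i hi]
    simp
    omega
  · rw [show i = ((i.toNat : Nat) : Int) by omega, keptB_natCast, Int.toNat_natCast]
    simp

-- the same ancestor-chain condition as keptNat, but read off the modified dict c
def chainB (c : PySem.Dict Int (Int × Int)) (i : Nat) : Bool :=
  if i = 0 then true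
  else
    match c.get? (((i - 1) / 2 : Nat) : Int) with
    | none => false
    | some v => (v.2 == 0) && chainB c ((i - 1) / 2)

theorem desc_child (c : PySem.Dict Int (Int × Int)) {i p m : Nat} (hd : Desc c i p)
    {v : Int × Int} (h : c.get? (p : Int) = some v) (hf : v.2 = 0)
    (hm : m = 2 * p + 1 ∨ m = 2 * p + 2) (hs : (c.get? (m : Int)).isSome) : Desc c i m := by
  induction hd with
  | refl j hj =>
    rcases hm with rfl | rfl
    · exact Desc.left h hf (Desc.refl _ hs)
    · exact Desc.right h hf (Desc.refl _ hs)
  | left h' hf' _ ih => exact Desc.left h' hf' (ih h hm)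
  | right h' hf' _ ih => exact Desc.right h' hf' (ih h hm)

theorem desc_chain_aux (c : PySem.Dict Int (Int × Int)) {i n : Nat} (hd : Desc c i n)
    (hc : chainB c i = true) : chainB c n = true ∧ (c.get? (n : Int)).isSome := by
  induction hd with
  | refl j hj => exact ⟨hc, hj⟩
  | @left i n v h hf _ ih =>
    apply ih
    rw [chainB, if_neg (by omega)]
    have hp : (2 * i + 1 - 1) / 2 = i := by omega
    rw [hp, h]
    simp [hf, hc]
  | @right i n v h hf _ ih =>
    apply ih
    rw [chainB, if_neg (by omega)]
    have hp : (2 * i + 2 - 1) / 2 = i := by omega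
    rw [hp, h]
    simp [hf, hc]

theorem desc_iff_chain (c : PySem.Dict Int (Int × Int)) (n : Nat) :
    Desc c 0 n ↔ chainB c n = true ∧ (c.get? (n : Int)).isSome := by
  constructor
  · intro hd; exact desc_chain_aux c hd (by rw [chainB]; simp)
  · rintro ⟨hc, hs⟩
    induction n using Nat.strong_induction_on with
    | _ n ih =>
      rcases Nat.eq_zero_or_pos n with rfl | hn
      · exact Desc.refl 0 hs
      · rw [chainB, if_neg (by omega)] at hc
        rcases hg : c.get? (((n - 1) / 2 : Nat) : Int) with _ | v
        · rw [hg] at hc; cases hc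
        · rw [hg] at hc
          simp only [Bool.and_eq_true, beq_iff_eq] at hc
          obtain ⟨hf, hcp⟩ := hc
          have hdp : Desc c 0 ((n - 1) / 2) :=
            ih _ (by omega) hcp (by rw [hg]; rfl)
          exact desc_child c hdp hg hf (by omega) hs

theorem keptNat_eq_chainB (d : PySem.Dict Int (Int × Int)) (k : Int) (leaf : Int × Int)
    (hleaf : leaf.2 ≠ 0) (i : Nat) : keptNat d k i = chainB (d.insert k leaf) i := by
  induction i using Nat.strong_induction_on with
  | _ i ih =>
    rcases Nat.eq_zero_or_pos i with rfl | hi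
    · rw [keptNat, chainB]; simp
    · rw [keptNat, chainB, if_neg (by omega), if_neg (by omega)]
      rw [PySem.Dict.get?_insert]
      by_cases hpk : (((i - 1) / 2 : Nat) : Int) = k
      · rw [if_pos hpk]
        rcases hg : d.get? (((i - 1) / 2 : Nat) : Int) with _ | v
        all_goals dsimp only
        · simp [hleaf]
        · rw [if_pos (Or.inr hpk)]
          simp [hleaf]
      · rw [if_neg hpk]
        rcases hg : d.get? (((i - 1) / 2 : Nat) : Int) with _ | v
        all_goals dsimp only
        · by_cases hv : v.2 = 0
          · rw [if_neg (fun h => h.elim (fun h1 => h1 hv) hpk), ih _ (by omega)]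
            simp [hv]
          · rw [if_pos (Or.inl hv)]
            simp [hv]

-- a loop of single-key deletions is one filter
theorem foldl_erase_items (rem : List Int) (c : PySem.Dict Int (Int × Int)) :
    (rem.foldl (fun t r => t.erase r) c).items
      = c.items.filter (fun e => !decide (e.1 ∈ rem)) := by
  induction rem generalizing c with
  | nil => simp
  | cons r rs ih =>
    rw [List.foldl_cons, ih]
    show (c.items.filter (fun p => !(p.1 == r))).filter _ = _
    rw [List.filter_filter]
    apply List.filter_congr
    intro e _
    by_cases h1 : e.1 = r <;> simp [h1]

theorem remove_orphans_items (c : PySem.Dict Int (Int × Int)) :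
    (remove_orphansA c).items
      = c.items.filter (fun e => PySem.Set.contains (markA c PySem.Set.empty 0) e.1) := by
  unfold remove_orphansA
  rw [foldl_erase_items]
  apply List.filter_congr
  intro e he
  have hkey : e.1 ∈ PySem.Dict.keys c := List.mem_map_of_mem he
  simp [hkey]

theorem filterMap_if_eq_filter_map (l : List (Int × Int × Int))
    (P : Int × Int × Int → Prop) [DecidablePred P] (g : Int × Int × Int → Int × Int × Int) :
    l.filterMap (fun e => if P e then some (g e) else none)
      = (l.filter (fun e => decide (P e))).map g := by
  induction l with
  | nil => rfl
  | cons a t ih => by_cases h : P a <;> simp [h, ih]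

theorem per_key (d : PySem.Dict Int (Int × Int)) (k : Int) (hk : k ∈ PySem.Dict.keys d)
    (leaf : Int × Int) (hleaf : leaf.2 ≠ 0) :
    (remove_orphansA (d.insert k leaf)).items = subB d k leaf := by
  have hcont : d.contains k = true := (PySem.Dict.contains_iff_mem_keys d k).mpr hk
  rw [remove_orphans_items, PySem.Dict.items_insert_of_contains d leaf hcont,
    List.filter_map, subB, filterMap_if_eq_filter_map]
  have hfg : (fun p : Int × Int × Int => if (p.1 == k) = true then (k, leaf) else p)
      = (fun e : Int × Int × Int => (e.1, if e.1 = k then leaf else e.2)) := by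
    funext e
    by_cases h : e.1 = k
    · simp [h]
    · simp [h]
  rw [hfg]
  congr 1
  apply List.filter_congr
  intro e he
  have hmemc : e.1 ∈ PySem.Dict.keys (d.insert k leaf) :=
    (PySem.Dict.mem_keys_insert d k e.1 leaf).mpr (Or.inr (List.mem_map_of_mem he))
  have hsome : ((d.insert k leaf).get? e.1).isSome := by
    cases hg : (d.insert k leaf).get? e.1
    · exact absurd ((PySem.Dict.get?_eq_none_iff_not_mem_keys _ _).mp hg) (by simpa using hmemc)
    · rfl
  have hiff : e.1 ∈ markA (d.insert k leaf) PySem.Set.empty 0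
      ↔ keptB d k e.1 = true := by
    rw [mem_markA, keptB_iff]
    constructor
    · rintro (hmem | ⟨n, hd, hEq⟩)
      · cases hmem
      · obtain ⟨hchain, -⟩ := (desc_iff_chain _ n).mp hd
        refine ⟨by rw [hEq]; positivity, ?_⟩
        rw [keptNat_eq_chainB d k leaf hleaf, hEq, Int.toNat_natCast]
        exact hchain
    · rintro ⟨h0, hkept⟩
      refine Or.inr ⟨e.1.toNat, (desc_iff_chain _ _).mpr ⟨?_, ?_⟩, (Int.toNat_of_nonneg h0).symm⟩
      · rw [← keptNat_eq_chainB d k leaf hleaf]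
        exact hkept
      · rw [Int.toNat_of_nonneg h0]
        exact hsome
  show PySem.Set.contains _ (e.1, _).1 = _
  dsimp only
  by_cases hx : keptB d k e.1 = true
  · rw [(PySem.Set.contains_iff _ _).mpr (hiff.mpr hx), decide_eq_true hx]
  · have h2 : PySem.Set.contains (markA (d.insert k leaf) PySem.Set.empty 0) e.1 = false := by
      cases h : PySem.Set.contains (markA (d.insert k leaf) PySem.Set.empty 0) e.1
      · rfl
      · exact absurd (hiff.mp ((PySem.Set.contains_iff _ _).mp h)) hx
    rw [h2, decide_eq_false hx]

-- ===== VERDICT (by name: the statement is the Claim_ definition above) =====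
theorem prune_get_subtrees_spec : Claim_equal_prune_get_subtrees := by
  intro tree _ hpre
  unfold Spec_prune_get_subtrees prune_get_subtrees prune_get_subtrees_alt
  dsimp only
  have hnd : (PySem.Dict.keys (PySem.Dict.mk tree)).Nodup := hpre
  rw [show PySem.Dict.keys (PySem.Dict.mk tree)
        = tree.map (fun e => e.1) from rfl, List.foldl_map]
  apply PySem.List.foldl_congr_mem
  intro acc e he
  have hget : (PySem.Dict.mk tree).get? e.1 = some e.2 :=
    PySem.Dict.get?_of_mem_items _ (by simpa using he) hnd
  rw [hget]
  dsimp only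
  by_cases hflag : e.2.2 = 0
  · rw [if_pos hflag, if_pos hflag,
      per_key _ e.1 (List.mem_map_of_mem he) (1, 1) (by norm_num),
      per_key _ e.1 (List.mem_map_of_mem he) (0, 1) (by norm_num)]
  · rw [if_neg hflag, if_neg hflag]
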